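-- pv_equiv track=rewrite | github.com/connertran/youtube | app.py | calculatingMaxWords
-- ===== SOURCE A (Python) =====
-- def calculatingMaxWords(words, maxWidth):
--     result = 0
--     currentWidth = 0
--     for word in words:
--         currentWidth += len(word) + 1 #after each word is a space
--         if currentWidth < maxWidth or currentWidth == maxWidth or currentWidth == maxWidth+1: #the or logic because the last word doesnt need to have the extra space
--             result += 1
--         else:
--             return result
--
--     return result
-- ===== SOURCE B (Python) =====
-- def calculatingMaxWords(words, maxWidth):
--     # Build prefix sums of len(word)+1, then binary-search for the
--     # number of cumulative widths <= maxWidth+1 (the sums are strictly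
--     # increasing, so that count equals the early-return count).
--     prefix = []
--     total = 0
--     for w in words:
--         total += len(w) + 1
--         prefix.append(total)
--     t = maxWidth + 1
--     lo, hi = 0, len(prefix)
--     while lo < hi:
--         mid = (lo + hi) // 2
--         if t < prefix[mid]:
--             hi = mid
--         else:
--             lo = mid + 1
--     return lo
-- ===== Notes on version B (the rewrite author's own statement) =====
-- stated objective: alternative
-- what changed: Replaces the word-by-word accumulate-and-branch loop with a precomputed prefix-sum table followed by a binary search (bisect_right by hand) for the threshold maxWidth+1.
import Mathlib
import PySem

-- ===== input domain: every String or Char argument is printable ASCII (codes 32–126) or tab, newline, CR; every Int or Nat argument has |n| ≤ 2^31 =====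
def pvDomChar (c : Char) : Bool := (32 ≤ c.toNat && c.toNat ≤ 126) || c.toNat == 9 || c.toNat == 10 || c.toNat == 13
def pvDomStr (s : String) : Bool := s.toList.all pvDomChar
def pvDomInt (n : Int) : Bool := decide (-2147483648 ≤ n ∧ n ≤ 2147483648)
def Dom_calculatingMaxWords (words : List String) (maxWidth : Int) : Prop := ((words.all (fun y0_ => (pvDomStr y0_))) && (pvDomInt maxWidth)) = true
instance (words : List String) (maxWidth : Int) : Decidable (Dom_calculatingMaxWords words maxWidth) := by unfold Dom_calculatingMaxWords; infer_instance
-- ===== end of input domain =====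

-- B replaces A's accumulate-and-branch loop by a prefix-sum table plus a binary search
-- for the threshold maxWidth+1 (objective: alternative algorithm, same exact result).

-- ===== PORT A =====
-- the for-loop of A: state (result, currentWidth), early return on the else branch
def pvLoopA (ws : List String) (result currentWidth maxWidth : Int) : Int :=
  match ws with
  | [] => result
  | w :: rest =>
    let cw := currentWidth + PySem.Str.len w + 1
    if cw < maxWidth ∨ cw = maxWidth ∨ cw = maxWidth + 1 then
      pvLoopA rest (result + 1) cw maxWidth
    else
      result

def calculatingMaxWords (words : List String) (maxWidth : Int) : Int :=
  pvLoopA words 0 0 maxWidth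

-- ===== PORT B =====
-- the first loop of B: prefix sums of len(w)+1 starting from accumulator `total`
def pvPrefix (ws : List String) (total : Int) : List Int :=
  match ws with
  | [] => []
  | w :: rest =>
    let total' := total + PySem.Str.len w + 1
    total' :: pvPrefix rest total'

-- the while-loop of B: bisect_right written by hand
-- (fuel makes the recursion structural; fuel = hi ≥ hi - lo steps always suffice)
def pvBisect (fuel : Nat) (xs : List Int) (t : Int) (lo hi : Nat) : Nat :=
  match fuel with
  | 0 => lo
  | fuel + 1 =>
    if lo < hi then
      if t < xs.getD ((lo + hi) / 2) 0 then pvBisect fuel xs t lo ((lo + hi) / 2)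
      else pvBisect fuel xs t ((lo + hi) / 2 + 1) hi
    else lo

def calculatingMaxWords_alt (words : List String) (maxWidth : Int) : Int :=
  let pre := pvPrefix words 0
  (pvBisect pre.length pre (maxWidth + 1) 0 pre.length : Int)

-- ===== PRECONDITION & SPEC =====
def Spec_calculatingMaxWords (words : List String) (maxWidth : Int) (out : Int) : Prop := out = calculatingMaxWords_alt words maxWidth
instance (words : List String) (maxWidth : Int) (out : Int) : Decidable (Spec_calculatingMaxWords words maxWidth out) := by unfold Spec_calculatingMaxWords; infer_instance

-- ===== CLAIM (what is proved, stated in full; the proofs are below) =====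
def Claim_equal_calculatingMaxWords : Prop := ∀ (words : List String) (maxWidth : Int), Dom_calculatingMaxWords words maxWidth → Spec_calculatingMaxWords words maxWidth (calculatingMaxWords words maxWidth)

-- ===== LEMMAS AND PROOFS =====

-- A's loop counts the leading prefix sums that are ≤ maxWidth + 1
theorem pvLoopA_eq_takeWhile (ws : List String) (r cw m : Int) :
    pvLoopA ws r cw m = r + (((pvPrefix ws cw).takeWhile (fun a => decide (a ≤ m + 1))).length : Int) := by
  induction ws generalizing r cw with
  | nil => simp [pvLoopA, pvPrefix]
  | cons w rest ih =>
    simp only [pvLoopA, pvPrefix, List.takeWhile_cons]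
    by_cases h : cw + PySem.Str.len w + 1 ≤ m + 1
    · rw [if_pos (by omega), if_pos (by simpa using h)]
      rw [ih]
      simp only [List.length_cons]
      push_cast
      ring
    · rw [if_neg (by omega), if_neg (by simpa using h)]
      simp

theorem pvPrefix_head_le (ws : List String) (acc : Int) :
    ∀ y ∈ pvPrefix ws acc, acc ≤ y := by
  induction ws generalizing acc with
  | nil => simp [pvPrefix]
  | cons w rest ih =>
    intro y hy
    have hlen : 0 ≤ PySem.Str.len w := by
      simp [PySem.Str.len_eq]
    simp only [pvPrefix, List.mem_cons] at hy
    rcases hy with h | h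
    · omega
    · have := ih (acc + PySem.Str.len w + 1) y h
      omega

theorem pvPrefix_pairwise (ws : List String) (acc : Int) :
    (pvPrefix ws acc).Pairwise (· ≤ ·) := by
  induction ws generalizing acc with
  | nil => simp [pvPrefix]
  | cons w rest ih =>
    simp only [pvPrefix, List.pairwise_cons]
    exact ⟨fun y hy => pvPrefix_head_le rest _ y hy, ih _⟩

-- monotonicity via getD
theorem getD_mono_of_pairwise (xs : List Int) (h : xs.Pairwise (· ≤ ·))
    (i j : Nat) (hij : i ≤ j) (hj : j < xs.length) :
    xs.getD i 0 ≤ xs.getD j 0 := by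
  rcases Nat.eq_or_lt_of_le hij with rfl | hlt
  · exact le_refl _
  · rw [List.getD_eq_getElem xs 0 (by omega), List.getD_eq_getElem xs 0 hj]
    exact (List.pairwise_iff_getElem.mp h) i j (by omega) hj hlt

-- takeWhile facts, phrased with getD
theorem takeWhile_getD {p : Int → Bool} (xs : List Int) (i : Nat)
    (hi : i < (xs.takeWhile p).length) : p (xs.getD i 0) = true := by
  induction xs generalizing i with
  | nil => simp [List.takeWhile] at hi
  | cons x rest ih =>
    by_cases hp : p x = true
    · rw [List.takeWhile_cons, if_pos hp] at hi
      cases i with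
      | zero => simp [hp]
      | succ n =>
        simp only [List.length_cons, Nat.succ_lt_succ_iff] at hi
        simpa using ih n hi
    · rw [List.takeWhile_cons, if_neg hp] at hi; simp at hi

theorem takeWhile_stop {p : Int → Bool} (xs : List Int)
    (h : (xs.takeWhile p).length < xs.length) :
    p (xs.getD (xs.takeWhile p).length 0) = false := by
  induction xs with
  | nil => simp at h
  | cons x rest ih =>
    by_cases hp : p x = true
    · rw [List.takeWhile_cons, if_pos hp] at h ⊢
      simp only [List.length_cons, Nat.succ_lt_succ_iff] at h
      simpa using ih h
    · rw [List.takeWhile_cons, if_neg hp] at h ⊢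
      simpa using hp

-- binary-search correctness: if k splits [lo,hi) into ≤ t and > t parts, pvBisect finds k
theorem pvBisect_eq (fuel : Nat) (xs : List Int) (t : Int) (k lo hi : Nat)
    (hfuel : hi - lo ≤ fuel)
    (hlok : lo ≤ k) (hkhi : k ≤ hi)
    (hbelow : ∀ i, lo ≤ i → i < k → xs.getD i 0 ≤ t)
    (habove : ∀ i, k ≤ i → i < hi → t < xs.getD i 0) :
    pvBisect fuel xs t lo hi = k := by
  induction fuel generalizing lo hi with
  | zero => simp only [pvBisect]; omega
  | succ fuel ih =>
    rw [pvBisect]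
    split
    · next h =>
      have hmid1 : lo ≤ (lo + hi) / 2 := by omega
      have hmid2 : (lo + hi) / 2 < hi := by omega
      split
      · next hcmp =>
        have hkm : k ≤ (lo + hi) / 2 := by
          by_contra hc
          exact absurd (hbelow _ hmid1 (by omega)) (by omega)
        exact ih lo _ (by omega) hlok hkm hbelow
          (fun i h1 h2 => habove i h1 (by omega))
      · next hcmp =>
        have hkm : (lo + hi) / 2 < k := by
          by_contra hc
          exact absurd (habove _ (by omega) hmid2) (by omega)
        exact ih _ hi (by omega) (by omega) hkhi
          (fun i h1 h2 => hbelow i (by omega) h2) habove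
    · omega

-- ===== VERDICT (by name: the statement is the Claim_ definition above) =====
theorem calculatingMaxWords_spec : Claim_equal_calculatingMaxWords := by
  intro words maxWidth _
  unfold Spec_calculatingMaxWords calculatingMaxWords calculatingMaxWords_alt
  set xs := pvPrefix words 0 with hxs
  set p : Int → Bool := fun a => decide (a ≤ maxWidth + 1) with hp
  set k := (xs.takeWhile p).length with hk
  have hklen : k ≤ xs.length := (xs.takeWhile_prefix p).length_le
  have hbis : pvBisect xs.length xs (maxWidth + 1) 0 xs.length = k := by
    apply pvBisect_eq xs.length xs (maxWidth + 1) k 0 xs.length (by omega) (by omega) hklen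
    · intro i _ hik
      have := takeWhile_getD xs i (by omega)
      simpa [hp] using this
    · intro i hki hil
      have hkl : k < xs.length := by omega
      have hstop : p (xs.getD k 0) = false := takeWhile_stop xs hkl
      have h1 : maxWidth + 1 < xs.getD k 0 := by simpa [hp] using hstop
      have h2 : xs.getD k 0 ≤ xs.getD i 0 :=
        getD_mono_of_pairwise xs (pvPrefix_pairwise words 0) k i hki hil
      omega
  rw [pvLoopA_eq_takeWhile]
  show _ = ((pvBisect xs.length xs (maxWidth + 1) 0 xs.length : Nat) : Int)
  rw [hbis, hk, hp, hxs]
  omega
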